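-- pv_equiv track=rewrite | github.com/BlueBrain/bbp-workflow | bbp_workflow/simulation/util.py | _indices_to_ranges
-- ===== SOURCE A (Python) =====
-- import itertools
--
-- def _indices_to_ranges(indices):
--     """Sequence of indices to slurm job array ranges."""
--     ranges = []
--     # diff between enumerated i and consecutive val will be the same(making group key)
--     for _, groups in itertools.groupby(enumerate(indices), lambda i_val: i_val[1] - i_val[0]):
--         groups = [g[1] for g in groups]  # take second tuple element which is index
--         if len(groups) > 1:
--             ranges.append(f"{groups[0]}-{groups[-1]}")
--         else:
--             ranges.append(str(groups[0]))
--     assert len(ranges) > 0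
--     return ",".join(ranges)
-- ===== SOURCE B (Python) =====
-- def _flush(start, prev):
--     return str(start) if start == prev else f"{start}-{prev}"
--
--
-- def _indices_to_ranges(indices):
--     """Sequence of indices to slurm job array ranges."""
--     ranges = []
--     start = prev = None
--     for x in indices:
--         if start is None:
--             start = prev = x
--         elif x == prev + 1:
--             prev = x
--         else:
--             ranges.append(_flush(start, prev))
--             start = prev = x
--     if start is not None:
--         ranges.append(_flush(start, prev))
--     assert len(ranges) > 0
--     return ",".join(ranges)
-- ===== Notes on version B (the rewrite author's own statement) =====
-- stated objective: simpler
-- what changed: Replaced the itertools.groupby/enumerate index-offset trick (building each group as a list and inspecting its length/ends) with a plain single pass that keeps only start and prev of the current run and flushes on a break.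
import Mathlib
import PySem

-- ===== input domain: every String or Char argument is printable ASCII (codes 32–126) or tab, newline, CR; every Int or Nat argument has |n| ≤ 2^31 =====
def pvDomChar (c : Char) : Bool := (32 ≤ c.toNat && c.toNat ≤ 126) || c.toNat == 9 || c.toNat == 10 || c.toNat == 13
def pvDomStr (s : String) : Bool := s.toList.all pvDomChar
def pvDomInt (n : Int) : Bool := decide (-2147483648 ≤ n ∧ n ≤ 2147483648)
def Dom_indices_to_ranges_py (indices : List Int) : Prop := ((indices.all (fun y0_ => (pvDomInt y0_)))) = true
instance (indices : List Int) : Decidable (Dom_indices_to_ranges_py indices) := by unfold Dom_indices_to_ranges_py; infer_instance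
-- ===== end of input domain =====

-- B replaces the itertools.groupby/enumerate trick with a plain start/prev run scan (simpler decomposition, same O(n)).

-- ===== PORT A =====
-- enumerate(indices): Python's enumerate starting at n
def pvEnum (n : Int) : List Int → List (Int × Int)
  | [] => []
  | x :: t => (n, x) :: pvEnum (n + 1) t

-- emit one group (list of the values of a groupby group, nonempty by construction):
-- f"{groups[0]}-{groups[-1]}" if len > 1 else str(groups[0])
def pvEmitA (g : List Int) : String :=
  if 1 < g.length then PySem.Int.toStr (g.headD 0) ++ "-" ++ PySem.Int.toStr (g.getLastD 0)
  else PySem.Int.toStr (g.headD 0)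

-- hand port of the groupby loop: `key` is the current group's (val - idx), `cur` the
-- current group's values, `ranges` the emitted strings; exact on every input.
def pvALoop (key : Int) (cur : List Int) (ranges : List String) : List (Int × Int) → List String
  | [] => ranges ++ [pvEmitA cur]
  | (i, v) :: t =>
    if v - i = key then pvALoop key (cur ++ [v]) ranges t
    else pvALoop (v - i) [v] (ranges ++ [pvEmitA cur]) t

def indices_to_ranges_py (indices : List Int) : String :=
  match pvEnum 0 indices with
  | [] => ","  -- unreachable under Pre_: Python raises AssertionError on empty input
  | (i, v) :: t => PySem.Str.join "," (pvALoop (v - i) [v] [] t)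

-- ===== PORT B =====
def pvFlush (start prev : Int) : String :=
  if start = prev then PySem.Int.toStr start
  else PySem.Int.toStr start ++ "-" ++ PySem.Int.toStr prev

def pvBLoop (start prev : Int) (ranges : List String) : List Int → List String
  | [] => ranges ++ [pvFlush start prev]
  | x :: t =>
    if x = prev + 1 then pvBLoop start x ranges t
    else pvBLoop x x (ranges ++ [pvFlush start prev]) t

def indices_to_ranges_py_alt (indices : List Int) : String :=
  match indices with
  | [] => ","  -- unreachable under Pre_: Python raises AssertionError on empty input
  | x :: t => PySem.Str.join "," (pvBLoop x x [] t)

-- ===== PRECONDITION & SPEC =====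
-- Pre_ excludes only the empty list, on which both A and B raise AssertionError.
def Pre_indices_to_ranges_py (indices : List Int) : Prop := indices ≠ []
instance (indices : List Int) : Decidable (Pre_indices_to_ranges_py indices) := by
  unfold Pre_indices_to_ranges_py; infer_instance

def pvWitness_indices_to_ranges_py : List Int := [1, 2, 3, 7]

def Spec_indices_to_ranges_py (indices : List Int) (out : String) : Prop := out = indices_to_ranges_py_alt indices
instance (indices : List Int) (out : String) : Decidable (Spec_indices_to_ranges_py indices out) := by unfold Spec_indices_to_ranges_py; infer_instance

-- ===== CLAIM (what is proved, stated in full; the proofs are below) =====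
def Claim_equal_indices_to_ranges_py : Prop := ∀ (indices : List Int), Dom_indices_to_ranges_py indices → Pre_indices_to_ranges_py indices → Spec_indices_to_ranges_py indices (indices_to_ranges_py indices)

-- ===== LEMMAS AND PROOFS =====

-- a run invariant: cur is nonempty, starts at `start`, ends at `prev`, and has >1
-- elements exactly when start < prev
def pvRun (start prev : Int) (cur : List Int) : Prop :=
  cur ≠ [] ∧ cur.headD 0 = start ∧ cur.getLastD 0 = prev ∧ start ≤ prev ∧ (1 < cur.length ↔ start < prev)

theorem pvRun_single (x : Int) : pvRun x x [x] := by
  simp [pvRun]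

theorem pvRun_extend {start prev : Int} {cur : List Int} (h : pvRun start prev cur) :
    pvRun start (prev + 1) (cur ++ [prev + 1]) := by
  obtain ⟨hne, hh, hl, hle, _⟩ := h
  refine ⟨by simp, ?_, ?_, by omega, ?_⟩
  · cases cur with
    | nil => exact absurd rfl hne
    | cons a t => simpa using hh
  · simp
  · constructor
    · intro _; omega
    · intro _
      cases cur with
      | nil => exact absurd rfl hne
      | cons a t => simp [List.length_append]

theorem pvEmitA_eq_flush {start prev : Int} {cur : List Int} (h : pvRun start prev cur) :
    pvEmitA cur = pvFlush start prev := by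
  obtain ⟨hne, hh, hl, hle, hlen⟩ := h
  unfold pvEmitA pvFlush
  by_cases hc : 1 < cur.length
  · have : start < prev := hlen.mp hc
    rw [if_pos hc, if_neg (by omega), hh, hl]
  · have : ¬ start < prev := fun h' => hc (hlen.mpr h')
    rw [if_neg hc, if_pos (by omega), hh]

theorem pvLoop_eq (t : List Int) : ∀ (n start prev : Int) (cur : List Int) (ranges : List String),
    pvRun start prev cur →
    pvALoop (prev - (n - 1)) cur ranges (pvEnum n t) = pvBLoop start prev ranges t := by
  induction t with
  | nil =>
    intro n start prev cur ranges h
    simp [pvEnum, pvALoop, pvBLoop, pvEmitA_eq_flush h]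
  | cons x t ih =>
    intro n start prev cur ranges h
    simp only [pvEnum, pvALoop, pvBLoop]
    by_cases hx : x = prev + 1
    · rw [if_pos (by omega), if_pos hx, hx]
      have := ih (n + 1) start (prev + 1) (cur ++ [prev + 1]) ranges (pvRun_extend h)
      rwa [show prev + 1 - (n + 1 - 1) = prev - (n - 1) by ring] at this
    · rw [if_neg (by omega), if_neg hx, pvEmitA_eq_flush h]
      have := ih (n + 1) x x [x] (ranges ++ [pvFlush start prev]) (pvRun_single x)
      rwa [show x - (n + 1 - 1) = x - n by ring] at this

-- ===== VERDICT (by name: the statement is the Claim_ definition above) =====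
theorem indices_to_ranges_py_spec : Claim_equal_indices_to_ranges_py := by
  intro indices _ hpre
  unfold Spec_indices_to_ranges_py
  cases indices with
  | nil => exact absurd rfl hpre
  | cons x t =>
    simp only [indices_to_ranges_py, indices_to_ranges_py_alt, pvEnum]
    have := pvLoop_eq t 1 x x [x] [] (pvRun_single x)
    rw [show (0 : Int) + 1 = 1 from by ring, show x - (0 : Int) = x - (1 - 1) by ring, this]
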